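-- pv_equiv track=rewrite | github.com/dirhq88/TextNormalizer | text_normalizer/text_normalizer.py | split_indices_by_pitch_change
-- ===== SOURCE A (Python) =====
-- from typing import Dict, List, Tuple
--
-- def split_indices_by_pitch_change(raw_indices: List[int], pitch_sequence: List[int]) -> List[Tuple[int, int]]:
--     '''
--     Example:
--         raw_indices: [0, 1, 2, 3]
--         pitch_sequence: [60, 60, 61, 61]
--         return: [(0, 1), (2, 3)]
--     '''
--     split_points = []
--     for i in range(raw_indices[0], raw_indices[-1]):
--         if pitch_sequence[i] != pitch_sequence[i+1]:
--             split_points.append(i)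
--
--     split_indices = []
--     start = raw_indices[0]
--     for point in split_points:
--         split_indices.append((start, point))
--         start = point + 1
--     split_indices.append((start, raw_indices[-1]))
--
--     return split_indices
-- ===== SOURCE B (Python) =====
-- def split_indices_by_pitch_change(raw_indices, pitch_sequence):
--     lo = raw_indices[0]
--     hi = raw_indices[-1]
--     if hi <= lo:
--         return [(lo, hi)]
--     # one run-length pass over the pitch values themselves: no split-points
--     # list and no second interval-building loop
--     seg = [pitch_sequence[i] for i in range(lo, hi + 1)]
--     out = []
--     cursor = lo
--     run = 1
--     for prev, cur in zip(seg, seg[1:]):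
--         if cur == prev:
--             run += 1
--         else:
--             out.append((cursor, cursor + run - 1))
--             cursor += run
--             run = 1
--     out.append((cursor, cursor + run - 1))
--     return out
-- ===== Notes on version B (the rewrite author's own statement) =====
-- stated objective: alternative
-- what changed: Replaced A's two staged passes over indices (collect a split-points list, then rebuild intervals from it) with a single run-length pass over the materialized pitch values: zip adjacent values of the slice and emit an interval whenever a run of equal values ends.
import Mathlib
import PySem

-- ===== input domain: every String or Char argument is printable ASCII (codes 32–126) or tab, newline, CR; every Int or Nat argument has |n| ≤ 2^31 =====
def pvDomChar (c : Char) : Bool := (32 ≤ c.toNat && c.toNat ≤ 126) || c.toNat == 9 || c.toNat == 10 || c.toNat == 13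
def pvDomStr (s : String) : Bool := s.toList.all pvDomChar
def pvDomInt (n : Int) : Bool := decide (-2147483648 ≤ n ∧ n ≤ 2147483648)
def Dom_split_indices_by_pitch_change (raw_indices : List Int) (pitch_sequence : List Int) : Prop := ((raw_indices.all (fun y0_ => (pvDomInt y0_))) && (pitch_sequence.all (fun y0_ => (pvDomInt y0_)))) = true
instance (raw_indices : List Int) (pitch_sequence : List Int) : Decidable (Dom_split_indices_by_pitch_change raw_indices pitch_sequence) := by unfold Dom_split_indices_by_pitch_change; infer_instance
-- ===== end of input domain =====

-- B replaces A's two staged passes over indices (split-points list, then interval rebuilding)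
-- with one run-length pass over the materialized pitch values; same cost (objective: alternative).

-- ===== PORT A =====
def split_indices_by_pitch_change (raw_indices : List Int) (pitch_sequence : List Int) : List (Int × Int) :=
  let first := (PySem.List.pyGet? raw_indices 0).getD 0
  let last := (PySem.List.pyGet? raw_indices (-1)).getD 0
  let split_points := (PySem.List.pyRange first last).foldl
    (fun acc i =>
      if (PySem.List.pyGet? pitch_sequence i).getD 0 ≠ (PySem.List.pyGet? pitch_sequence (i + 1)).getD 0
      then acc ++ [i] else acc) []
  let st := split_points.foldl
    (fun (p : List (Int × Int) × Int) point => (p.1 ++ [(p.2, point)], point + 1)) ([], first)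
  st.1 ++ [(st.2, last)]

-- ===== PORT B =====
def split_indices_by_pitch_change_alt (raw_indices : List Int) (pitch_sequence : List Int) : List (Int × Int) :=
  let lo := (PySem.List.pyGet? raw_indices 0).getD 0
  let hi := (PySem.List.pyGet? raw_indices (-1)).getD 0
  if hi ≤ lo then [(lo, hi)]
  else
    let seg := (PySem.List.pyRange lo (hi + 1)).map
      (fun i => (PySem.List.pyGet? pitch_sequence i).getD 0)
    let st := (seg.zip seg.tail).foldl
      (fun (p : List (Int × Int) × Int × Int) pc =>
        if pc.2 == pc.1 then (p.1, p.2.1, p.2.2 + 1)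
        else (p.1 ++ [(p.2.1, p.2.1 + p.2.2 - 1)], p.2.1 + p.2.2, 1)) ([], lo, 1)
    st.1 ++ [(st.2.1, st.2.1 + st.2.2 - 1)]

-- ===== PRECONDITION & SPEC =====
-- Pre_ excludes exactly the inputs where Python A raises IndexError: empty raw_indices, or a
-- nonempty scan range reaching a pitch_sequence index outside [-len, len).
def Pre_split_indices_by_pitch_change (raw_indices : List Int) (pitch_sequence : List Int) : Prop :=
  raw_indices ≠ [] ∧
  (raw_indices.headD 0 < raw_indices.getLastD 0 →
    -(pitch_sequence.length : Int) ≤ raw_indices.headD 0 ∧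
    raw_indices.getLastD 0 < (pitch_sequence.length : Int))
instance (raw_indices : List Int) (pitch_sequence : List Int) : Decidable (Pre_split_indices_by_pitch_change raw_indices pitch_sequence) := by unfold Pre_split_indices_by_pitch_change; infer_instance
def pvWitness_split_indices_by_pitch_change : List Int × List Int := ([0, 1, 2, 3], [60, 60, 61, 61])

def Spec_split_indices_by_pitch_change (raw_indices : List Int) (pitch_sequence : List Int) (out : List (Int × Int)) : Prop := out = split_indices_by_pitch_change_alt raw_indices pitch_sequence
instance (raw_indices : List Int) (pitch_sequence : List Int) (out : List (Int × Int)) : Decidable (Spec_split_indices_by_pitch_change raw_indices pitch_sequence out) := by unfold Spec_split_indices_by_pitch_change; infer_instance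

-- ===== CLAIM (what is proved, stated in full; the proofs are below) =====
def Claim_equal_split_indices_by_pitch_change : Prop := ∀ (raw_indices : List Int) (pitch_sequence : List Int), Dom_split_indices_by_pitch_change raw_indices pitch_sequence → Pre_split_indices_by_pitch_change raw_indices pitch_sequence → Spec_split_indices_by_pitch_change raw_indices pitch_sequence (split_indices_by_pitch_change raw_indices pitch_sequence)

-- ===== LEMMAS AND PROOFS =====

-- the intervals determined by a (sorted) list of split points, ending at hi
def pvIvl (hi : Int) : Int → List Int → List (Int × Int)
  | start, [] => [(start, hi)]
  | start, p :: r => (start, p) :: pvIvl hi (p + 1) r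

-- A's second loop builds exactly pvIvl
lemma pvA_loop (hi : Int) : ∀ (S : List Int) (acc : List (Int × Int)) (start : Int),
    (let st := S.foldl (fun (p : List (Int × Int) × Int) point => (p.1 ++ [(p.2, point)], point + 1)) (acc, start);
     st.1 ++ [(st.2, hi)]) = acc ++ pvIvl hi start S := by
  intro S
  induction S with
  | nil => intro acc start; simp [pvIvl]
  | cons p r ih =>
      intro acc start
      simp only [List.foldl_cons]
      rw [ih (acc ++ [(start, p)]) (p + 1)]
      simp [pvIvl]

-- zipping the value slice with its own tail yields the adjacent-pair list over the index range
lemma pvZip_pairs (g : Int → Int) : ∀ (n : Nat) (a hi : Int), a ≤ hi → (hi - a).toNat = n →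
    (((PySem.List.pyRange a (hi + 1)).map g).zip ((PySem.List.pyRange a (hi + 1)).map g).tail)
      = (PySem.List.pyRange a hi).map (fun i => (g i, g (i + 1))) := by
  intro n
  induction n with
  | zero =>
      intro a hi hle h
      have hae : a = hi := by omega
      subst hae
      rw [PySem.List.pyRange_one_cons (by omega : a < a + 1)]
      have h2 : PySem.List.pyRange (a + 1) (a + 1) = [] := PySem.List.pyRange_one_eq_nil (by omega)
      have h3 : PySem.List.pyRange a a = [] := PySem.List.pyRange_one_eq_nil (by omega)
      simp [h2, h3]
  | succ m ih =>
      intro a hi hle h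
      have hlt : a < hi := by omega
      rw [PySem.List.pyRange_one_cons (by omega : a < hi + 1)]
      rw [PySem.List.pyRange_one_cons hlt]
      have ihs := ih (a + 1) hi (by omega) (by omega)
      rw [PySem.List.pyRange_one_cons (by omega : a + 1 < hi + 1)] at *
      simp only [List.map_cons, List.tail_cons] at ihs ⊢
      rw [List.zip_cons_cons, ihs]

-- B's fold maintains (intervals so far, start of current run, its length); closing it gives pvIvl
lemma pvB_loop (g : Int → Int) (hi : Int) :
    ∀ (n : Nat) (j : Int) (out : List (Int × Int)) (cursor runLen : Int), (hi - j).toNat = n → j ≤ hi → cursor + runLen - 1 = j →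
    (let st := ((PySem.List.pyRange j hi).map (fun i => (g i, g (i + 1)))).foldl
        (fun (p : List (Int × Int) × Int × Int) pc =>
          if pc.2 == pc.1 then (p.1, p.2.1, p.2.2 + 1)
          else (p.1 ++ [(p.2.1, p.2.1 + p.2.2 - 1)], p.2.1 + p.2.2, 1)) (out, cursor, runLen);
     st.1 ++ [(st.2.1, st.2.1 + st.2.2 - 1)])
      = out ++ pvIvl hi cursor ((PySem.List.pyRange j hi).filter
          (fun i => decide (g i ≠ g (i + 1)))) := by
  intro n
  induction n with
  | zero =>
      intro j out cursor runLen h hle hcur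
      have hje : j = hi := by omega
      subst hje
      have h0 : PySem.List.pyRange j j = [] := PySem.List.pyRange_one_eq_nil (by omega)
      have hce : cursor + runLen - 1 = j := hcur
      simp only [h0, List.map_nil, List.foldl_nil, List.filter_nil, pvIvl, hce]
  | succ m ih =>
      intro j out cursor runLen h hle hcur
      have hlt : j < hi := by omega
      rw [PySem.List.pyRange_one_cons hlt]
      simp only [List.map_cons, List.foldl_cons, List.filter_cons]
      by_cases hc : g j = g (j + 1)
      · have hbeq : (g (j + 1) == g j) = true := by simp [hc]
        have hcnd : ¬ (decide ¬g j = g (j + 1)) = true := by simp [hc]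
        rw [if_pos hbeq, if_neg hcnd]
        exact ih (j + 1) out cursor (runLen + 1) (by omega) (by omega) (by omega)
      · have hbeq : ¬ (g (j + 1) == g j) = true := by
          simp only [beq_iff_eq]; exact fun he => hc he.symm
        have hcnd : (decide ¬g j = g (j + 1)) = true := by simp [hc]
        rw [if_neg hbeq, if_pos hcnd]
        have hrec := ih (j + 1) (out ++ [(cursor, cursor + runLen - 1)]) (cursor + runLen) 1
          (by omega) (by omega) (by omega)
        simp only at hrec
        rw [hrec, hcur]
        have hnext : cursor + runLen = j + 1 := by omega
        rw [hnext]
        simp [pvIvl]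

theorem pv_core (raw_indices pitch_sequence : List Int) :
    split_indices_by_pitch_change raw_indices pitch_sequence
      = split_indices_by_pitch_change_alt raw_indices pitch_sequence := by
  unfold split_indices_by_pitch_change split_indices_by_pitch_change_alt
  set lo := (PySem.List.pyGet? raw_indices 0).getD 0 with hlo
  set hi := (PySem.List.pyGet? raw_indices (-1)).getD 0 with hhi
  set g : Int → Int := fun i => (PySem.List.pyGet? pitch_sequence i).getD 0 with hg
  set cond : Int → Bool := fun i => decide (g i ≠ g (i + 1)) with hcond
  have hite : ∀ {α : Type} (i : Int) (x y : α),
      (if (PySem.List.pyGet? pitch_sequence i).getD 0 ≠ (PySem.List.pyGet? pitch_sequence (i + 1)).getD 0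
       then x else y) = (if cond i then x else y) := by
    intro α i x y
    by_cases h : (PySem.List.pyGet? pitch_sequence i).getD 0 = (PySem.List.pyGet? pitch_sequence (i + 1)).getD 0
    · rw [if_neg (not_not_intro h), if_neg (by simp [hcond, hg, h])]
    · rw [if_pos h, if_pos (by simp [hcond, hg, h])]
  simp only [hite]
  have hA : (PySem.List.pyRange lo hi).foldl (fun acc i => if cond i then acc ++ [i] else acc) []
      = (PySem.List.pyRange lo hi).filter cond := by
    simpa using PySem.List.foldl_append_if cond (fun i => i) (PySem.List.pyRange lo hi) []
  simp only [hA]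
  rw [pvA_loop hi ((PySem.List.pyRange lo hi).filter cond) [] lo]
  by_cases hle : hi ≤ lo
  · have h0 : PySem.List.pyRange lo hi = [] := PySem.List.pyRange_one_eq_nil hle
    simp [hle, h0, pvIvl]
  · have hlt : lo < hi := by omega
    simp only [if_neg hle]
    rw [pvZip_pairs g (hi - lo).toNat lo hi (by omega) rfl]
    rw [pvB_loop g hi (hi - lo).toNat lo [] lo 1 rfl (by omega) (by omega)]

-- ===== VERDICT (by name: the statement is the Claim_ definition above) =====
theorem split_indices_by_pitch_change_spec : Claim_equal_split_indices_by_pitch_change := by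
  intro raw_indices pitch_sequence _ _
  unfold Spec_split_indices_by_pitch_change
  exact pv_core raw_indices pitch_sequence
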